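-- pv_equiv track=rewrite | github.com/pypi-data/pypi-mirror-377 | packages/mcp-devtools/mcp_devtools-2.2.11-py3-none-any.whl/server.py | _split_aider_sessions
-- ===== SOURCE A (Python) =====
-- def _split_aider_sessions(text: str) -> list[str]:
--     """
--     Split Aider chat history into sessions by the '# aider chat started at' anchor.
--     Each chunk will include the anchor line for clarity.
--
--     Args:
--         text: The full chat history text
--
--     Returns:
--         A list of session chunks, each starting with the anchor
--     """
--     anchor = "# aider chat started at"
--     chunks = []
--     lines = text.split('\n')
--     current_chunk: list[str] = []
--
--     for line in lines:
--         if line.startswith(anchor) and current_chunk: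
--             # Found a new session, save the previous one
--             chunks.append('\n'.join(current_chunk) + '\n')
--             current_chunk = [line]
--         else:
--             current_chunk.append(line)
--
--     # Don't forget the last chunk
--     if current_chunk:
--         chunks.append('\n'.join(current_chunk) + '\n')
--
--     return chunks
-- ===== SOURCE B (Python) =====
-- def _split_aider_sessions(text: str) -> list[str]:
--     """Index-then-slice: find interior anchor-line boundaries, then cut."""
--     anchor = "# aider chat started at"
--     lines = text.split('\n')
--     bounds = [i for i, line in enumerate(lines) if i > 0 and line.startswith(anchor)]
--     cuts = [0] + bounds + [len(lines)]
--     return ['\n'.join(lines[a:b]) + '\n' for a, b in zip(cuts, cuts[1:])]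
-- ===== Notes on version B (the rewrite author's own statement) =====
-- stated objective: simpler
-- what changed: Replaces A's accumulate-and-flush state machine (mutable current_chunk with a flush-on-anchor branch and a trailing flush) by a two-phase index-then-slice pass: collect the interior anchor-line boundary indices, then cut the line list at those boundaries and join each slice.
import Mathlib
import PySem

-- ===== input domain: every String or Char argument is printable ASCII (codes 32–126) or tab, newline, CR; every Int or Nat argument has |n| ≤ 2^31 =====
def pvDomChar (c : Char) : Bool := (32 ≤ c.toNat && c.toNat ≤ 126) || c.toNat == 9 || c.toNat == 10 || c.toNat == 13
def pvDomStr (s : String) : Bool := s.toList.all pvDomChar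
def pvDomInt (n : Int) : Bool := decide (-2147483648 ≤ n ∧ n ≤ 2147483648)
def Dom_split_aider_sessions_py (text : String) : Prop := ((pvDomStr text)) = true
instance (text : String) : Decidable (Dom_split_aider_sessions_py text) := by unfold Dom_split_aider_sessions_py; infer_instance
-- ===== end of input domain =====

-- B replaces A's accumulate-and-flush state machine by an index-then-slice pass (boundary indices, then cut); objective: simpler decomposition, same cost.

-- ===== PORT A =====
-- text.split('\n'): sep is the non-empty literal "\n", so PySem.Str.split? is always `some`; `.getD []` only unwraps it.
def split_aider_sessions_py (text : String) : List String :=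
  let anchor := "# aider chat started at"
  let lines := (PySem.Str.split? text "\n").getD []
  let st := lines.foldl
    (fun (s : List String × List String) line =>
      if PySem.Str.startswith line anchor && !s.2.isEmpty then
        (s.1 ++ [PySem.Str.join "\n" s.2 ++ "\n"], [line])
      else
        (s.1, s.2 ++ [line]))
    ([], [])
  if !st.2.isEmpty then st.1 ++ [PySem.Str.join "\n" st.2 ++ "\n"] else st.1

-- ===== PORT B =====
def split_aider_sessions_py_alt (text : String) : List String :=
  let anchor := "# aider chat started at"
  let lines := (PySem.Str.split? text "\n").getD []
  let bounds := ((PySem.List.enumerate lines 0).filter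
      (fun p => decide ((0 : Int) < p.1) && PySem.Str.startswith p.2 anchor)).map (·.1)
  let cuts : List Int := 0 :: (bounds ++ [(lines.length : Int)])
  (cuts.zip cuts.tail).map
    (fun p => PySem.Str.join "\n" (PySem.List.slice lines (some p.1) (some p.2)) ++ "\n")

-- ===== PRECONDITION & SPEC =====
def Spec_split_aider_sessions_py (text : String) (out : List String) : Prop := out = split_aider_sessions_py_alt text
instance (text : String) (out : List String) : Decidable (Spec_split_aider_sessions_py text out) := by unfold Spec_split_aider_sessions_py; infer_instance

-- ===== CLAIM (what is proved, stated in full; the proofs are below) =====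
def Claim_equal_split_aider_sessions_py : Prop := ∀ (text : String), Dom_split_aider_sessions_py text → Spec_split_aider_sessions_py text (split_aider_sessions_py text)

-- ===== LEMMAS AND PROOFS =====

def pvIsA (l : String) : Bool := PySem.Str.startswith l "# aider chat started at"

def pvOut (cs : List String) : String := PySem.Str.join "\n" cs ++ "\n"

def pvStep (s : List String × List String) (line : String) : List String × List String :=
  if pvIsA line && !s.2.isEmpty then (s.1 ++ [pvOut s.2], [line]) else (s.1, s.2 ++ [line])

def pvAfin (st : List String × List String) : List String :=
  if !st.2.isEmpty then st.1 ++ [pvOut st.2] else st.1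

def pvBounds (lines : List String) : List Int :=
  ((PySem.List.enumerate lines 0).filter (fun p => decide ((0 : Int) < p.1) && pvIsA p.2)).map (·.1)

def pvCuts (lines : List String) : List Int := 0 :: (pvBounds lines ++ [(lines.length : Int)])

def pvBcore (lines : List String) : List String :=
  ((pvCuts lines).zip (pvCuts lines).tail).map
    (fun p => PySem.Str.join "\n" (PySem.List.slice lines (some p.1) (some p.2)) ++ "\n")

theorem pvA_eq (text : String) :
    split_aider_sessions_py text =
      pvAfin (((PySem.Str.split? text "\n").getD []).foldl pvStep ([], [])) := rfl

theorem pvB_eq (text : String) :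
    split_aider_sessions_py_alt text = pvBcore ((PySem.Str.split? text "\n").getD []) := rfl

-- splitOn.go always returns a reversed nonempty accumulator
theorem pv_go_ne (sep : List Char) : ∀ (fuel : Nat) (l cur : List Char) (acc : List (List Char)),
    PySem.Chars.splitOn.go sep fuel l cur acc ≠ [] := by
  intro fuel
  induction fuel with
  | zero => intro l cur acc; simp [PySem.Chars.splitOn.go]
  | succ n ih =>
    intro l cur acc
    cases l with
    | nil => simp [PySem.Chars.splitOn.go]
    | cons c rest =>
      rw [PySem.Chars.splitOn.go]
      split <;> apply ih

-- Python's str.split with a non-empty separator never returns an empty list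
theorem pv_split_ne_nil (text : String) : (PySem.Str.split? text "\n").getD [] ≠ [] := by
  have h := PySem.Str.split?_map text "\n"
  have hc : PySem.Chars.split? text.toList "\n".toList = some (PySem.Chars.splitOn text.toList "\n".toList) := by
    simp [PySem.Chars.split?]
  rw [hc] at h
  cases hs : PySem.Str.split? text "\n" with
  | none => rw [hs] at h; simp at h
  | some l =>
    rw [hs] at h
    simp only [Option.map_some, Option.some.injEq] at h
    have hne : PySem.Chars.splitOn text.toList "\n".toList ≠ [] := by
      rw [PySem.Chars.splitOn]
      apply pv_go_ne
    intro hnil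
    simp only [Option.getD_some] at hnil
    subst hnil
    simp only [List.map_nil] at h
    exact hne h.symm

theorem pv_enum_shift (xs : List String) : ∀ (s k : Int),
    PySem.List.enumerate xs (k + s) = (PySem.List.enumerate xs s).map (fun p => (k + p.1, p.2)) := by
  induction xs with
  | nil => intro s k; simp [PySem.List.enumerate_nil]
  | cons x xs ih =>
    intro s k
    rw [PySem.List.enumerate_cons, PySem.List.enumerate_cons, List.map_cons]
    have : k + s + 1 = k + (s + 1) := by ring
    rw [this, ih (s + 1) k]

-- a list whose tail is anchor-free contributes no boundary indices
theorem pv_bounds_nil (cur : List String) (hne : cur ≠ [])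
    (hfree : ∀ l ∈ cur.tail, pvIsA l = false) :
    (PySem.List.enumerate cur 0).filter (fun p => decide ((0 : Int) < p.1) && pvIsA p.2) = [] := by
  rw [List.filter_eq_nil_iff]
  intro p hp
  rw [PySem.List.mem_enumerate_iff] at hp
  obtain ⟨k, hk, rfl⟩ := hp
  cases k with
  | zero => simp
  | succ j =>
    have hmem : cur[j + 1] ∈ cur.tail := by
      cases cur with
      | nil => simp at hne
      | cons c cs => simpa using List.getElem_mem (by simp at hk ⊢; omega)
    simp [hfree _ hmem]

-- with a positive start index the 'i > 0' guard is vacuous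
theorem pv_filter_pos (ls : List String) (s : Int) (hs : 0 < s) :
    (PySem.List.enumerate ls s).filter (fun p => decide ((0 : Int) < p.1) && pvIsA p.2) =
      (PySem.List.enumerate ls s).filter (fun p => pvIsA p.2) := by
  apply List.filter_congr
  intro p hp
  rw [PySem.List.mem_enumerate_iff] at hp
  obtain ⟨k, hk, rfl⟩ := hp
  have hc : (0 : Int) < s + k := by positivity
  rw [decide_eq_true hc, Bool.true_and]

theorem pv_bounds_nonneg (lines : List String) : ∀ x ∈ pvBounds lines, 0 ≤ x := by
  intro x hx
  unfold pvBounds at hx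
  obtain ⟨p, hp, rfl⟩ := List.mem_map.mp hx
  have := List.mem_of_mem_filter hp
  rw [PySem.List.mem_enumerate_iff] at this
  obtain ⟨k, hk, rfl⟩ := this
  simp

theorem pv_cuts_nonneg (lines : List String) : ∀ x ∈ pvCuts lines, 0 ≤ x := by
  intro x hx
  unfold pvCuts at hx
  rcases List.mem_cons.mp hx with rfl | hx
  · exact le_refl 0
  rcases List.mem_append.mp hx with hx | hx
  · exact pv_bounds_nonneg lines x hx
  · simp at hx; omega

theorem pv_base (cur : List String) (hne : cur ≠ [])
    (hfree : ∀ l ∈ cur.tail, pvIsA l = false) :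
    pvBcore cur = [pvOut cur] := by
  unfold pvBcore pvCuts pvBounds
  rw [pv_bounds_nil cur hne hfree]
  simp only [List.map_nil, List.nil_append, List.tail_cons, List.zip_cons_cons, List.zip_nil_right,
    List.map_cons, List.map_nil]
  rw [PySem.List.slice_zero_start, PySem.List.slice_to_natCast]
  simp [pvOut]

-- slicing after an untouched prefix is slicing the suffix
theorem pv_slice_shift (xs ys : List String) (a b : Int) (ha : 0 ≤ a) (hb : 0 ≤ b) :
    PySem.List.slice (xs ++ ys) (some ((xs.length : Int) + a)) (some ((xs.length : Int) + b)) =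
      PySem.List.slice ys (some a) (some b) := by
  rw [PySem.List.slice_toNat _ (by positivity) (by positivity),
      PySem.List.slice_toNat _ ha hb]
  have hA : ((xs.length : Int) + a).toNat = xs.length + a.toNat := by omega
  have hB : ((xs.length : Int) + b).toNat - (xs.length + a.toNat) = b.toNat - a.toNat := by omega
  rw [hA, hB, List.drop_append]
  simp [List.drop_of_length_le]

theorem pv_bounds_cons (cur : List String) (l : String) (ls : List String) (hne : cur ≠ [])
    (hfree : ∀ x ∈ cur.tail, pvIsA x = false) (hl : pvIsA l = true) :
    pvBounds (cur ++ l :: ls) =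
      (cur.length : Int) :: (pvBounds (l :: ls)).map (fun a => (cur.length : Int) + a) := by
  unfold pvBounds
  rw [PySem.List.enumerate_append, List.filter_append, pv_bounds_nil cur hne hfree, List.nil_append]
  have h1 : (0 : Int) + cur.length = (cur.length : Int) + 0 := by ring
  rw [h1, pv_enum_shift (l :: ls) 0 cur.length]
  rw [List.filter_map, List.map_map]
  have h2 : ((fun p => decide ((0 : Int) < p.1) && pvIsA p.2) ∘ (fun (p : Int × String) => ((cur.length : Int) + p.1, p.2)))
      = fun (p : Int × String) => decide ((0 : Int) < (cur.length : Int) + p.1) && pvIsA p.2 := rfl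
  rw [h2]
  have h3 : (PySem.List.enumerate (l :: ls) 0).filter (fun p => decide ((0 : Int) < (cur.length : Int) + p.1) && pvIsA p.2)
      = (PySem.List.enumerate (l :: ls) 0).filter (fun p => pvIsA p.2) := by
    apply List.filter_congr
    intro p hp
    rw [PySem.List.mem_enumerate_iff] at hp
    obtain ⟨k, hk, rfl⟩ := hp
    have hc : (0 : Int) < (cur.length : Int) + (0 + k) := by
      have : 1 ≤ (cur.length : Int) := by
        cases cur with
        | nil => simp at hne
        | cons c cs => simp
      omega
    rw [decide_eq_true hc, Bool.true_and]
  rw [h3]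
  rw [PySem.List.enumerate_cons, List.filter_cons, List.filter_cons,
      pv_filter_pos ls (0 + 1) (by norm_num)]
  simp [hl, List.map_map]

theorem pv_cuts_cons (cur : List String) (l : String) (ls : List String) (hne : cur ≠ [])
    (hfree : ∀ x ∈ cur.tail, pvIsA x = false) (hl : pvIsA l = true) :
    pvCuts (cur ++ l :: ls) = 0 :: (pvCuts (l :: ls)).map (fun a => (cur.length : Int) + a) := by
  unfold pvCuts
  rw [pv_bounds_cons cur l ls hne hfree hl]
  simp

-- KEY: a flush boundary splits B's slice decomposition at the front
theorem pv_key (cur : List String) (l : String) (ls : List String) (hne : cur ≠ [])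
    (hfree : ∀ x ∈ cur.tail, pvIsA x = false) (hl : pvIsA l = true) :
    pvBcore (cur ++ l :: ls) = pvOut cur :: pvBcore (l :: ls) := by
  unfold pvBcore
  rw [pv_cuts_cons cur l ls hne hfree hl]
  have hr : pvCuts (l :: ls) = 0 :: (pvBounds (l :: ls) ++ [((l :: ls).length : Int)]) := rfl
  rw [hr]
  simp only [List.map_cons, List.tail_cons, List.zip_cons_cons, add_zero]
  rw [show ((cur.length : Int) :: (pvBounds (l :: ls) ++ [((l :: ls).length : Int)]).map
        (fun a => (cur.length : Int) + a)) = ((0 : Int) :: (pvBounds (l :: ls) ++ [((l :: ls).length : Int)])).map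
        (fun a => (cur.length : Int) + a) from by simp]
  rw [List.zip_map]
  congr 1
  · rw [PySem.List.slice_zero_start, PySem.List.slice_to _ (by positivity)]
    simp [pvOut]
  · rw [List.map_map]
    apply List.map_congr_left
    intro p hp
    obtain ⟨a, b⟩ := p
    obtain ⟨h1, h2⟩ := List.of_mem_zip hp
    have ha : 0 ≤ a := pv_cuts_nonneg (l :: ls) a (by rw [hr]; exact h1)
    have hb : 0 ≤ b := pv_cuts_nonneg (l :: ls) b (by rw [hr]; exact List.mem_cons_of_mem _ h2)
    simp only [Function.comp_apply, Prod.map_apply]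
    rw [pv_slice_shift cur (l :: ls) a b ha hb]

-- MAIN invariant: A's flush loop from a nonempty anchor-free-tail chunk equals B on the remaining lines
theorem pv_main (ls : List String) : ∀ (cur chunks : List String), cur ≠ [] →
    (∀ x ∈ cur.tail, pvIsA x = false) →
    pvAfin (ls.foldl pvStep (chunks, cur)) = chunks ++ pvBcore (cur ++ ls) := by
  induction ls with
  | nil =>
    intro cur chunks hne hfree
    simp only [List.foldl_nil, List.append_nil]
    rw [pv_base cur hne hfree, pvAfin]
    simp [hne]
  | cons l ls ih =>
    intro cur chunks hne hfree
    simp only [List.foldl_cons]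
    by_cases hl : pvIsA l = true
    · have hstep : pvStep (chunks, cur) l = (chunks ++ [pvOut cur], [l]) := by
        simp [pvStep, hl, hne]
      rw [hstep, ih [l] (chunks ++ [pvOut cur]) (by simp) (by simp),
          pv_key cur l ls hne hfree hl]
      simp
    · have hstep : pvStep (chunks, cur) l = (chunks, cur ++ [l]) := by
        simp [pvStep, hl]
      rw [hstep, ih (cur ++ [l]) chunks (by simp) ?_]
      · simp
      · intro x hx
        have : x ∈ cur.tail ++ [l] := by
          cases cur with
          | nil => simp at hne
          | cons c cs => simpa using hx
        rcases List.mem_append.mp this with h | h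
        · exact hfree x h
        · revert hl; simp at h; subst h; cases pvIsA x <;> simp

-- ===== VERDICT (by name: the statement is the Claim_ definition above) =====
theorem split_aider_sessions_py_spec : Claim_equal_split_aider_sessions_py := by
  intro text _
  unfold Spec_split_aider_sessions_py
  rw [pvA_eq, pvB_eq]
  obtain ⟨l0, rest, hsplit⟩ : ∃ l0 rest, (PySem.Str.split? text "\n").getD [] = l0 :: rest := by
    cases h : (PySem.Str.split? text "\n").getD [] with
    | nil => exact absurd h (pv_split_ne_nil text)
    | cons a b => exact ⟨a, b, rfl⟩
  rw [hsplit]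
  have h0 : pvStep ([], []) l0 = ([], [l0]) := by simp [pvStep]
  rw [List.foldl_cons, h0, pv_main rest [l0] [] (by simp) (by simp)]
  simp
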